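-- pv_equiv track=rewrite | github.com/FachengG/Texas_Hold_Poker_Winner_Referee | Referee.py | One_Pair_to_fingerprint
-- ===== SOURCE A (Python) =====
-- def One_Pair_to_fingerprint(cards):
--     values_list = [card[1] for card in cards]
--     values_set = set(values_list)
--     rest_cards_list = values_list
--     result = []
--
--     if len(values_set) == 6:
--         for value in values_set:
--             if values_list.count(value) == 2:
--                 result.append(value)
--                 break
--
--         rest_cards_list.remove(result[0])
--         rest_cards_list.remove(result[0])
--         rest_cards_list.sort(reverse=True)
--
--         result = result + rest_cards_list
--         return result[0:4]
--
--     else: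
--         return [0,0,0,0]
-- ===== SOURCE B (Python) =====
-- def One_Pair_to_fingerprint(cards):
--     sorted_vals = sorted((card[1] for card in cards), reverse=True)
--     if len(set(sorted_vals)) != 6:
--         return [0, 0, 0, 0]
--     pair = next(v for v, w in zip(sorted_vals, sorted_vals[1:]) if v == w)
--     kickers = [v for v in sorted_vals if v != pair]
--     return [pair] + kickers[:3]
-- ===== Notes on version B (the rewrite author's own statement) =====
-- stated objective: alternative
-- what changed: B sorts all seven values descending once, finds the pair as the first adjacent equal entries of the sorted list, and builds the kickers by filtering the pair value out of the already-sorted list, replacing A's count-over-set scan, double remove and late sort.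
-- outside the precondition, e.g. on One_Pair_to_fingerprint([(0, 1), (0, 2), (0, 3), (0, 4), (0, 5), (0, 6)]): A raises IndexError, B raises StopIteration
import Mathlib
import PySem

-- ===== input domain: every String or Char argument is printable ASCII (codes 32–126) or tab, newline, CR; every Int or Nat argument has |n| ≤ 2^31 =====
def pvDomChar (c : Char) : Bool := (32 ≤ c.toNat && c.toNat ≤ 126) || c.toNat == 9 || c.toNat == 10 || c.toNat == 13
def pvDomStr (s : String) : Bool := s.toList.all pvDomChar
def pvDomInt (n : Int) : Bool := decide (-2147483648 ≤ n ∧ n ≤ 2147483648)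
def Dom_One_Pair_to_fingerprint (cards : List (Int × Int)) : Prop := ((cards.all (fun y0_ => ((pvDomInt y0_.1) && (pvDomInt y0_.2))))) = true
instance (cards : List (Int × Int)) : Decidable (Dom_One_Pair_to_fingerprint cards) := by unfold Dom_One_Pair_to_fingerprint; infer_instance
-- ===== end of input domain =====

-- B replaces A's count-over-set scan + double remove + late sort by one descending sort,
-- an adjacent-equal scan for the pair, and a filter for the kickers (alternative decomposition).

-- ===== PORT A =====
def One_Pair_to_fingerprint (cards : List (Int × Int)) : List Int :=
  let values_list := cards.map (fun c => c.2)
  let values_set := PySem.Set.ofList values_list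
  if values_set.length = 6 then
    -- 'for value in values_set: if count == 2: append; break' — first match over the set;
    -- inside Pre_ the matching value is unique, so the result does not depend on the
    -- (unmodelled) Python set iteration order.
    match values_set.find? (fun v => values_list.count v == 2) with
    | none => []        -- Python: result[0] raises IndexError here (outside Pre_)
    | some p =>
      match PySem.List.remove? values_list p with
      | none => []      -- ValueError (unreachable: p ∈ values_list)
      | some l1 =>
        match PySem.List.remove? l1 p with
        | none => []    -- ValueError (outside Pre_)
        | some l2 =>
          let rest := PySem.List.sorted l2 (fun x => x) true
          PySem.List.slice ([p] ++ rest) (some 0) (some 4)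
  else [0, 0, 0, 0]

-- ===== PORT B =====
-- 'next(v for v, w in zip(sorted_vals, sorted_vals[1:]) if v == w)'
def findAdjPair : List Int → Option Int
  | a :: b :: t => if a = b then some a else findAdjPair (b :: t)
  | _ => none

def One_Pair_to_fingerprint_alt (cards : List (Int × Int)) : List Int :=
  let sorted_vals := PySem.List.sorted (cards.map (fun c => c.2)) (fun x => x) true
  if (PySem.Set.ofList sorted_vals).length ≠ 6 then [0, 0, 0, 0]
  else
    match findAdjPair sorted_vals with
    | none => []        -- Python: next() raises StopIteration here (outside Pre_)
    | some pair => pair :: ((sorted_vals.filter (fun v => v ≠ pair)).take 3)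

-- ===== PRECONDITION & SPEC =====
-- Pre_ excludes inputs whose value multiset has exactly 6 distinct values but is not 7 cards
-- long: there A either raises (IndexError/ValueError when no value has count exactly 2) or
-- returns a value that depends on Python's unmodelled set iteration order (two candidate pairs).
def Pre_One_Pair_to_fingerprint (cards : List (Int × Int)) : Prop :=
  cards.length = 7 ∨ (PySem.Set.ofList (cards.map (fun c => c.2))).length ≠ 6
instance (cards : List (Int × Int)) : Decidable (Pre_One_Pair_to_fingerprint cards) := by
  unfold Pre_One_Pair_to_fingerprint; infer_instance

def pvWitness_One_Pair_to_fingerprint : (List (Int × Int)) :=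
  [(0, 2), (1, 2), (0, 3), (0, 4), (0, 5), (0, 6), (0, 7)]

def Spec_One_Pair_to_fingerprint (cards : List (Int × Int)) (out : List Int) : Prop := out = One_Pair_to_fingerprint_alt cards
instance (cards : List (Int × Int)) (out : List Int) : Decidable (Spec_One_Pair_to_fingerprint cards out) := by unfold Spec_One_Pair_to_fingerprint; infer_instance

-- ===== CLAIM (what is proved, stated in full; the proofs are below) =====
def Claim_equal_One_Pair_to_fingerprint : Prop := ∀ (cards : List (Int × Int)), Dom_One_Pair_to_fingerprint cards → Pre_One_Pair_to_fingerprint cards → Spec_One_Pair_to_fingerprint cards (One_Pair_to_fingerprint cards)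


-- ===== LEMMAS AND PROOFS =====
lemma setLen_congr (xs ys : List Int) (h : xs.Perm ys) :
    (PySem.Set.ofList xs).length = (PySem.Set.ofList ys).length := by
  refine List.Perm.length_eq ?_
  refine (List.perm_ext_iff_of_nodup (PySem.Set.nodup_ofList xs) (PySem.Set.nodup_ofList ys)).mpr ?_
  intro a
  simp [PySem.Set.mem_ofList, h.mem_iff]

lemma pigeonhole (l : List Int) (h7 : l.length = 7) (h6 : (PySem.Set.ofList l).length = 6) :
    ∃ p ∈ l, l.count p = 2 ∧ ∀ q ∈ l, q ≠ p → l.count q = 1 := by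
  have hperm : (PySem.Set.ofList l).Perm l.dedup := by
    refine (List.perm_ext_iff_of_nodup (PySem.Set.nodup_ofList l) l.nodup_dedup).mpr ?_
    intro a
    simp [PySem.Set.mem_ofList]
  have hcard : l.toFinset.card = 6 := by
    have hlen : (PySem.Set.ofList l).length = l.dedup.length := hperm.length_eq
    rw [h6] at hlen
    rw [List.card_toFinset]
    omega
  have hsum : ∑ a ∈ l.toFinset, l.count a = 7 := by
    rw [List.sum_toFinset_count_eq_length l, h7]
  have hpos : ∀ a ∈ l.toFinset, 1 ≤ l.count a := by
    intro a ha
    exact List.count_pos_iff.mpr (List.mem_toFinset.mp ha)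
  have hsum' : ∑ a ∈ l.toFinset, (l.count a - 1) = 1 := by
    have he : ∑ a ∈ l.toFinset, l.count a = ∑ a ∈ l.toFinset, ((l.count a - 1) + 1) := by
      apply Finset.sum_congr rfl
      intro a ha
      have := hpos a ha
      omega
    rw [he, Finset.sum_add_distrib, Finset.sum_const, hcard] at hsum
    simp at hsum
    omega
  obtain ⟨p, hpF, hp⟩ : ∃ p ∈ l.toFinset, l.count p - 1 ≠ 0 := by
    by_contra hno
    push Not at hno
    have : ∑ a ∈ l.toFinset, (l.count a - 1) = 0 :=
      Finset.sum_eq_zero (fun a ha => hno a ha)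
    omega
  have hsplit : l.count p - 1 + ∑ a ∈ l.toFinset.erase p, (l.count a - 1)
      = ∑ a ∈ l.toFinset, (l.count a - 1) :=
    Finset.add_sum_erase l.toFinset (fun a => l.count a - 1) hpF
  rw [hsum'] at hsplit
  have hrest : ∑ a ∈ l.toFinset.erase p, (l.count a - 1) = 0 := by omega
  refine ⟨p, List.mem_toFinset.mp hpF, ?_, ?_⟩
  · have := hpos p hpF
    omega
  · intro q hq hne
    have hqF : q ∈ l.toFinset.erase p := Finset.mem_erase.mpr ⟨hne, List.mem_toFinset.mpr hq⟩
    have h0 := (Finset.sum_eq_zero_iff.mp hrest) q hqF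
    have h1 := hpos q (List.mem_toFinset.mpr hq)
    omega

lemma find?_eq_some_of_unique {α : Type} (p : α → Bool) (xs : List α) (x : α)
    (hx : x ∈ xs) (hpx : p x = true) (huniq : ∀ y ∈ xs, p y = true → y = x) :
    xs.find? p = some x := by
  induction xs with
  | nil => simp at hx
  | cons a t ih =>
    by_cases hpa : p a = true
    · rw [List.find?_cons_of_pos hpa, huniq a (by simp) hpa]
    · have hx' : x ∈ t := by
        rcases List.mem_cons.mp hx with h | h
        · exact absurd (h ▸ hpx) hpa
        · exact h
      rw [List.find?_cons_of_neg hpa]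
      exact ih hx' (fun y hy hpy => huniq y (List.mem_cons_of_mem a hy) hpy)

lemma findAdjPair_eq (s : List Int) (p : Int)
    (hs : s.Pairwise (fun a b => b ≤ a))
    (hc : s.count p = 2)
    (ho : ∀ q, q ≠ p → s.count q ≤ 1) :
    findAdjPair s = some p := by
  induction s with
  | nil => simp at hc
  | cons a t ih =>
    cases t with
    | nil =>
      have : (([a] : List Int)).count p ≤ 1 := List.count_le_length
      omega
    | cons b t' =>
      by_cases hab : a = b
      · have h2 : 2 ≤ (a :: b :: t').count a := by
          simp [hab]
        have hap : a = p := by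
          by_contra hne
          have := ho a hne
          omega
        subst hab
        subst hap
        simp [findAdjPair]
      · have hba : b ≤ a := (List.pairwise_cons.mp hs).1 b (by simp)
        have htail : (b :: t').Pairwise (fun x y => y ≤ x) := (List.pairwise_cons.mp hs).2
        have hlt : ∀ x ∈ b :: t', x < a := by
          intro x hx
          rcases List.mem_cons.mp hx with h | h
          · subst h
            exact lt_of_le_of_ne hba (fun he => hab he.symm)
          · exact lt_of_le_of_lt ((List.pairwise_cons.mp htail).1 x h)
              (lt_of_le_of_ne hba (fun he => hab he.symm))
        have hna : a ∉ b :: t' := fun h => lt_irrefl a (hlt a h)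
        have hca : (a :: b :: t').count a = 1 := by
          simp [List.count_eq_zero_of_not_mem hna]
        have hap : p ≠ a := by
          intro h
          rw [h] at hc
          omega
        have hc' : (b :: t').count p = 2 := by
          have hcc : (a :: b :: t').count p = (b :: t').count p := by
            simp [List.count_cons, Ne.symm hap]
          omega
        have ho' : ∀ q, q ≠ p → (b :: t').count q ≤ 1 := by
          intro q hq
          have h1 := ho q hq
          have h2 : (b :: t').count q ≤ (a :: b :: t').count q := by
            simp [List.count_cons]
          omega
        have := ih htail hc' ho'
        simp [findAdjPair, hab, this]

lemma pairwise_lt_of_le_nodup (ys : List Int) (h1 : ys.Pairwise (fun a b => b ≤ a))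
    (h2 : ys.Nodup) : ys.Pairwise (fun a b => b < a) := by
  induction ys with
  | nil => simp
  | cons a t ih =>
    rw [List.pairwise_cons] at h1 ⊢
    rw [List.nodup_cons] at h2
    exact ⟨fun b hb => lt_of_le_of_ne (h1.1 b hb) (fun he => h2.1 (he ▸ hb)), ih h1.2 h2.2⟩

lemma rest_eq (l : List Int) (p : Int)
    (hc : l.count p = 2) (ho : ∀ q, q ≠ p → l.count q ≤ 1) :
    PySem.List.sorted ((l.erase p).erase p) (fun x => x) true
      = (PySem.List.sorted l (fun x => x) true).filter (fun v => v ≠ p) := by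
  have hsp : (PySem.List.sorted l (fun x => x) true).Perm l :=
    PySem.List.sorted_perm l _ _
  have hcount : ∀ a, ((PySem.List.sorted l (fun x => x) true).filter (fun v => v ≠ p)).count a
      = ((l.erase p).erase p).count a := by
    intro a
    have hfl : ((PySem.List.sorted l (fun x => x) true).filter (fun v => v ≠ p)).count a
        = (l.filter (fun v => v ≠ p)).count a := (hsp.filter _).count_eq a
    rcases eq_or_ne a p with h | h
    · subst h
      rw [hfl]
      have h1 : (l.filter (fun v => v ≠ a)).count a = 0 := by
        simp [List.count_eq_zero, List.mem_filter]
      have h2 : ((l.erase a).erase a).count a = (l.erase a).count a - 1 :=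
        List.count_erase_self
      have h3 : (l.erase a).count a = l.count a - 1 := List.count_erase_self
      omega
    · rw [hfl]
      have h1 : (l.filter (fun v => v ≠ p)).count a = l.count a := by
        rw [List.count_filter]
        simp [h]
      have h2 : ((l.erase p).erase p).count a = l.count a := by
        rw [List.count_erase_of_ne h, List.count_erase_of_ne h]
      omega
  have hperm : ((PySem.List.sorted l (fun x => x) true).filter (fun v => v ≠ p)).Perm
      ((l.erase p).erase p) := List.perm_iff_count.mpr hcount
  have hnd : ((PySem.List.sorted l (fun x => x) true).filter (fun v => v ≠ p)).Nodup := by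
    rw [List.nodup_iff_count_le_one]
    intro a
    rcases eq_or_ne a p with h | h
    · subst h
      have h0 : ((PySem.List.sorted l (fun x => x) true).filter (fun v => v ≠ a)).count a = 0 := by
        simp [List.count_eq_zero, List.mem_filter]
      omega
    · have h1 := hcount a
      have h2 : ((l.erase p).erase p).count a = l.count a := by
        rw [List.count_erase_of_ne h, List.count_erase_of_ne h]
      have h3 := ho a h
      omega
  have hpw : ((PySem.List.sorted l (fun x => x) true).filter (fun v => v ≠ p)).Pairwise
      (fun a b => b ≤ a) :=
    List.Pairwise.filter _ (PySem.List.sorted_pairwise_rev l (fun x => x))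
  exact PySem.List.sorted_rev_eq_of_perm_of_pairwise_gt _ _ _ hperm
    (pairwise_lt_of_le_nodup _ hpw hnd)

-- ===== VERDICT (by name: the statement is the Claim_ definition above) =====
theorem One_Pair_to_fingerprint_spec : Claim_equal_One_Pair_to_fingerprint := by
  intro cards _ hpre
  unfold Spec_One_Pair_to_fingerprint One_Pair_to_fingerprint One_Pair_to_fingerprint_alt
  set l := cards.map (fun c => c.2) with hl
  have hsetlen : (PySem.Set.ofList (PySem.List.sorted l (fun x => x) true)).length
      = (PySem.Set.ofList l).length :=
    setLen_congr _ _ (PySem.List.sorted_perm l _ _)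
  by_cases h6 : (PySem.Set.ofList l).length = 6
  · have h7 : l.length = 7 := by
      rcases hpre with h | h
      · simpa [hl] using h
      · exact absurd h6 h
    obtain ⟨p, hpl, hcp, hothers⟩ := pigeonhole l h7 h6
    have hle1 : ∀ q, q ≠ p → l.count q ≤ 1 := by
      intro q hq
      by_cases hql : q ∈ l
      · exact le_of_eq (hothers q hql hq)
      · simp [List.count_eq_zero_of_not_mem hql]
    have hfind : (PySem.Set.ofList l).find? (fun v => l.count v == 2) = some p := by
      apply find?_eq_some_of_unique
      · exact (PySem.Set.mem_ofList l p).mpr hpl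
      · simp [hcp]
      · intro y hy hpy
        simp only [beq_iff_eq] at hpy
        by_contra hne
        have := hle1 y hne
        omega
    have hpe : p ∈ l.erase p := by
      have : (l.erase p).count p = l.count p - 1 := List.count_erase_self
      rw [hcp] at this
      exact List.count_pos_iff.mp (by omega)
    have hr1 : PySem.List.remove? l p = some (l.erase p) :=
      PySem.List.remove?_eq_some_erase l p hpl
    have hr2 : PySem.List.remove? (l.erase p) p = some ((l.erase p).erase p) :=
      PySem.List.remove?_eq_some_erase (l.erase p) p hpe
    have hsc := (PySem.List.sorted_perm l (fun x => x) true).count_eq p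
    have hadj : findAdjPair (PySem.List.sorted l (fun x => x) true) = some p := by
      apply findAdjPair_eq
      · exact PySem.List.sorted_pairwise_rev l (fun x => x)
      · omega
      · intro q hq
        have h1 := hle1 q hq
        have h2 := (PySem.List.sorted_perm l (fun x => x) true).count_eq q
        omega
    simp only [hfind, hr1, hr2, hadj, hsetlen, h6, ne_eq, not_true_eq_false, if_false]
    rw [rest_eq l p hcp hle1]
    have hslice := PySem.List.slice_natCast
      ([p] ++ (PySem.List.sorted l (fun x => x) true).filter (fun v => v ≠ p)) 0 4
    simp only [Nat.cast_ofNat, Nat.cast_zero] at hslice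
    rw [hslice]
    simp [List.take_succ_cons]
  · rw [if_neg h6, if_pos (by rw [hsetlen]; exact h6)]
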